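-- pv_equiv track=rewrite | github.com/lordvaider/wordle | wordle.py | yellow
-- ===== SOURCE A (Python) =====
-- def yellow(g, s, Green):
--     secretWG = [x for ii, x in enumerate(s) if ii not in Green]
--
--     Y = []
--     for ii, x in enumerate(g):
--         if ii not in Green and x in secretWG:
--             Y.append(ii)
--             secretWG.remove(x)
--
--     return Y
-- ===== SOURCE B (Python) =====
-- def yellow(g, s, Green):
--     green = set(Green)
--
--     def free(w, c):
--         return sum(1 for jj, y in enumerate(w) if jj not in green and y == c)
--
--     return [ii for ii, x in enumerate(g)
--             if ii not in green and free(g[:ii], x) < free(s, x)]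
-- ===== Notes on version B (the rewrite author's own statement) =====
-- stated objective: alternative
-- what changed: Replaces A's stateful scan that consumes letters from a mutable leftover list (membership test + list.remove) by a stateless closed-form per-position predicate: index ii is yellow iff it is non-green and the number of earlier non-green occurrences of its letter in the guess is below the letter's non-green count in the secret.
import Mathlib
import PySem

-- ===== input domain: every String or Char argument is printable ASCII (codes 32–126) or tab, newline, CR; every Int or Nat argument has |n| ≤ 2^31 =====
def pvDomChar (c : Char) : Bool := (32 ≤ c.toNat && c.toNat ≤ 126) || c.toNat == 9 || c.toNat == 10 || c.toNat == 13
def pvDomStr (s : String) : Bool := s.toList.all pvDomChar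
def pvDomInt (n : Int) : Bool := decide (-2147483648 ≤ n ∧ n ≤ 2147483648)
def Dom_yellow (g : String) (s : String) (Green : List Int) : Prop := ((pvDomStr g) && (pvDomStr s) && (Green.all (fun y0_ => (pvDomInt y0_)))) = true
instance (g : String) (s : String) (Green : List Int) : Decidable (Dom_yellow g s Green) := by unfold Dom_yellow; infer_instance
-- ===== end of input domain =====

-- B replaces A's stateful scan consuming a mutable leftover-letters list by a stateless
-- closed-form per-position predicate (rank of the letter among earlier non-green guess
-- positions vs its non-green count in the secret): an alternative algorithm of similar cost.

-- ===== PORT A =====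
def yellow (g : String) (s : String) (Green : List Int) : List Int :=
  let secretWG : List Char :=
    (PySem.List.enumerate s.toList).foldl
      (fun acc p => if (p.1 ∈ Green) then acc else acc ++ [p.2]) []
  let r :=
    (PySem.List.enumerate g.toList).foldl
      (fun (st : List Int × List Char) p =>
        if p.1 ∉ Green ∧ p.2 ∈ st.2 then
          (st.1 ++ [p.1], (PySem.List.remove? st.2 p.2).getD st.2)  -- guard ensures membership, so remove? is some
        else st)
      ([], secretWG)
  r.1

-- ===== PORT B =====
-- B's local helper free(w, c): sum(1 for jj, y in enumerate(w) if jj not in green and y == c)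
def pvFree (green : PySem.Set Int) (w : List Char) (c : Char) : Int :=
  (PySem.List.enumerate w).foldl
    (fun acc p => if p.1 ∉ green ∧ p.2 = c then acc + 1 else acc) 0

def yellow_alt (g : String) (s : String) (Green : List Int) : List Int :=
  let green : PySem.Set Int := PySem.Set.ofList Green
  (PySem.List.enumerate g.toList).foldl
    (fun acc p =>
      if p.1 ∉ green ∧
         pvFree green (PySem.List.slice g.toList none (some p.1)) p.2 < pvFree green s.toList p.2
      then acc ++ [p.1] else acc) []

-- ===== PRECONDITION & SPEC =====
def Spec_yellow (g : String) (s : String) (Green : List Int) (out : List Int) : Prop := out = yellow_alt g s Green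
instance (g : String) (s : String) (Green : List Int) (out : List Int) : Decidable (Spec_yellow g s Green out) := by unfold Spec_yellow; infer_instance

-- ===== CLAIM (what is proved, stated in full; the proofs are below) =====
def Claim_equal_yellow : Prop := ∀ (g : String) (s : String) (Green : List Int), Dom_yellow g s Green → Spec_yellow g s Green (yellow g s Green)

-- ===== LEMMAS AND PROOFS =====

-- 0/1 indicator of "index not green and letter = c" for one enumerate pair
def pvInd (green : PySem.Set Int) (c : Char) (p : Int × Char) : Int :=
  if p.1 ∉ green ∧ p.2 = c then 1 else 0

theorem pvEnumAppend {α : Type} (u v : List α) : ∀ (st : Int),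
    PySem.List.enumerate (u ++ v) st =
      PySem.List.enumerate u st ++ PySem.List.enumerate v (st + u.length) := by
  induction u with
  | nil => intro st; simp [PySem.List.enumerate_nil]
  | cons a t ih =>
    intro st
    have harg : st + 1 + (t.length : Int) = st + ((t.length + 1 : Nat) : Int) := by
      push_cast; ring
    simp only [List.cons_append, PySem.List.enumerate_cons, ih (st + 1), List.length_cons, harg]

theorem pvFree_eq_sum (green : PySem.Set Int) (w : List Char) (c : Char) :
    pvFree green w c = ((PySem.List.enumerate w).map (pvInd green c)).sum := by
  unfold pvFree
  have hstep : (fun (acc : Int) (p : Int × Char) => if p.1 ∉ green ∧ p.2 = c then acc + 1 else acc)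
      = fun acc p => acc + pvInd green c p := by
    funext acc p; unfold pvInd; split_ifs <;> simp
  rw [hstep, PySem.List.foldl_add, zero_add]

theorem pvFree_nonneg (green : PySem.Set Int) (w : List Char) (c : Char) :
    0 ≤ pvFree green w c := by
  rw [pvFree_eq_sum]
  apply List.sum_nonneg
  intro x hx
  rcases List.mem_map.1 hx with ⟨p, -, rfl⟩
  unfold pvInd; split_ifs <;> simp

theorem pvFree_append_singleton (green : PySem.Set Int) (u : List Char) (a c : Char) :
    pvFree green (u ++ [a]) c
      = pvFree green u c + pvInd green c ((u.length : Int), a) := by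
  rw [pvFree_eq_sum, pvFree_eq_sum, pvEnumAppend u [a] 0]
  simp [PySem.List.enumerate_cons, PySem.List.enumerate_nil]

-- A's secret-letters comprehension counted per character equals B's free(s, c)
theorem pvCount (Green : List Int) (c : Char) : ∀ (l : List (Int × Char)) (acc : List Char),
    (((l.foldl (fun acc p => if (p.1 ∈ Green) then acc else acc ++ [p.2]) acc)).count c : Int)
      = (acc.count c : Int) + (l.map (pvInd (PySem.Set.ofList Green) c)).sum := by
  intro l
  induction l with
  | nil => intro acc; simp
  | cons p t ih =>
    intro acc
    simp only [List.foldl_cons, List.map_cons, List.sum_cons]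
    by_cases hg : p.1 ∈ Green
    · rw [if_pos hg]
      have : pvInd (PySem.Set.ofList Green) c p = 0 := by
        unfold pvInd
        rw [if_neg]
        rintro ⟨h1, -⟩
        exact h1 ((PySem.Set.mem_ofList _ _).2 hg)
      rw [ih acc, this]; ring
    · rw [if_neg hg, ih (acc ++ [p.2])]
      have : pvInd (PySem.Set.ofList Green) c p = if p.2 = c then 1 else 0 := by
        unfold pvInd
        by_cases hc : p.2 = c
        · rw [if_pos ⟨fun h => hg ((PySem.Set.mem_ofList _ _).1 h), hc⟩, if_pos hc]
        · rw [if_neg (fun h => hc h.2), if_neg hc]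
      rw [this, List.count_append]
      by_cases hc : p.2 = c
      · subst hc; simp; ring
      · simp [hc]

-- main loop correspondence: A's consuming scan = B's stateless per-position predicate
theorem pvMain (Green : List Int) (gl : List Char) (cap : Char → Int) :
    ∀ (t pref : List Char), gl = pref ++ t →
    ∀ (Y : List Int) (wg : List Char),
    (∀ c, (wg.count c : Int) = max (cap c - pvFree (PySem.Set.ofList Green) pref c) 0) →
    ((PySem.List.enumerate t (pref.length : Int)).foldl
        (fun (st : List Int × List Char) p =>
          if p.1 ∉ Green ∧ p.2 ∈ st.2 then
            (st.1 ++ [p.1], (PySem.List.remove? st.2 p.2).getD st.2)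
          else st) (Y, wg)).1
    = (PySem.List.enumerate t (pref.length : Int)).foldl
        (fun acc p =>
          if p.1 ∉ PySem.Set.ofList Green ∧
             pvFree (PySem.Set.ofList Green) (PySem.List.slice gl none (some p.1)) p.2 < cap p.2
          then acc ++ [p.1] else acc) Y := by
  intro t
  induction t with
  | nil => intro pref _ Y wg _; simp [PySem.List.enumerate_nil]
  | cons a t' ih =>
    intro pref hgl Y wg hwg
    simp only [PySem.List.enumerate_cons, List.foldl_cons]
    have hsl : PySem.List.slice gl none (some ((pref.length : Nat) : Int)) = pref := by
      rw [hgl, PySem.List.slice_to_natCast, List.take_left]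
    have hgl' : gl = (pref ++ [a]) ++ t' := by rw [hgl]; simp
    have hlen : (((pref ++ [a]).length : Nat) : Int) = (pref.length : Int) + 1 := by
      simp
    have hmem : a ∈ wg ↔ pvFree (PySem.Set.ofList Green) pref a < cap a := by
      rw [← List.count_pos_iff]
      have h := hwg a
      omega
    by_cases hg : (pref.length : Int) ∈ Green
    · have hg' : ((pref.length : Int) ∈ PySem.Set.ofList Green) := (PySem.Set.mem_ofList _ _).2 hg
      rw [if_neg (fun h => h.1 hg), if_neg (fun h => h.1 hg')]
      have := ih (pref ++ [a]) hgl' Y wg ?_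
      · rw [← hlen]; exact this
      · intro c
        rw [pvFree_append_singleton]
        have : pvInd (PySem.Set.ofList Green) c ((pref.length : Int), a) = 0 := by
          unfold pvInd; rw [if_neg]; rintro ⟨h1, -⟩; exact h1 hg'
        rw [this, add_zero]; exact hwg c
    · have hg' : ((pref.length : Int) ∉ PySem.Set.ofList Green) :=
        fun h => hg ((PySem.Set.mem_ofList _ _).1 h)
      by_cases hm : a ∈ wg
      · rw [if_pos ⟨hg, hm⟩, if_pos ⟨hg', by rw [hsl]; exact hmem.1 hm⟩,
            PySem.List.remove?_eq_some_erase _ _ hm, Option.getD_some]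
        have := ih (pref ++ [a]) hgl' (Y ++ [(pref.length : Int)]) (wg.erase a) ?_
        · rw [← hlen]; exact this
        · intro c
          rw [pvFree_append_singleton]
          have hcnt : 0 < wg.count a := List.count_pos_iff.2 hm
          have ha := hwg a
          by_cases hc : a = c
          · subst hc
            have hind : pvInd (PySem.Set.ofList Green) a ((pref.length : Int), a) = 1 := by
              unfold pvInd; rw [if_pos ⟨hg', rfl⟩]
            rw [hind, List.count_erase_self]
            omega
          · have hind : pvInd (PySem.Set.ofList Green) c ((pref.length : Int), a) = 0 := by
              unfold pvInd; rw [if_neg]; rintro ⟨-, h2⟩; exact hc h2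
            rw [hind, add_zero, List.count_erase_of_ne (Ne.symm hc)]
            exact hwg c
      · rw [if_neg (fun h => hm h.2),
            if_neg (by rintro ⟨-, h2⟩; rw [hsl] at h2; exact hm (hmem.2 h2))]
        have := ih (pref ++ [a]) hgl' Y wg ?_
        · rw [← hlen]; exact this
        · intro c
          rw [pvFree_append_singleton]
          have ha := hwg a
          have hcnt : wg.count a = 0 := by
            by_contra h
            exact hm (List.count_pos_iff.1 (Nat.pos_of_ne_zero h))
          by_cases hc : a = c
          · subst hc
            have hind : pvInd (PySem.Set.ofList Green) a ((pref.length : Int), a) = 1 := by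
              unfold pvInd; rw [if_pos ⟨hg', rfl⟩]
            rw [hind]
            have hcc := hwg a
            omega
          · have hind : pvInd (PySem.Set.ofList Green) c ((pref.length : Int), a) = 0 := by
              unfold pvInd; rw [if_neg]; rintro ⟨-, h2⟩; exact hc h2
            rw [hind, add_zero]
            exact hwg c

-- ===== VERDICT (by name: the statement is the Claim_ definition above) =====
theorem yellow_spec : Claim_equal_yellow := by
  intro g s Green _
  unfold Spec_yellow yellow yellow_alt
  have h := pvMain Green g.toList (fun c => pvFree (PySem.Set.ofList Green) s.toList c)
    g.toList [] (by simp) []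
    ((PySem.List.enumerate s.toList).foldl
      (fun acc p => if (p.1 ∈ Green) then acc else acc ++ [p.2]) []) ?_
  · simpa using h
  · intro c
    have h2 := pvFree_nonneg (PySem.Set.ofList Green) s.toList c
    rw [pvCount Green c, ← pvFree_eq_sum]
    show _ = max (pvFree (PySem.Set.ofList Green) s.toList c
                    - pvFree (PySem.Set.ofList Green) [] c) 0
    have hnil : pvFree (PySem.Set.ofList Green) [] c = 0 := by
      simp [pvFree, PySem.List.enumerate_nil]
    simp only [List.count_nil, Nat.cast_zero, zero_add, hnil, sub_zero]
    omega
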